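-- pv_equiv track=rewrite | github.com/moonrShan/leetcodePy | Solution_R1.py | DistinctCountAfterRemoval
-- ===== SOURCE A (Python) =====
-- import collections
-- from typing import List
--
-- def DistinctCountAfterRemoval(nums: List[int] ,removalCount: int) -> int:
--     counter = collections.Counter(nums)
--     freqs = sorted(counter.values())
--     result = len(freqs)
--     for freq in freqs:
--         if removalCount >= freq:
--             result -= 1
--             removalCount -= freq
--         else:
--             break
--     return result
-- ===== SOURCE B (Python) =====
-- import collections
-- from typing import List
--
-- def DistinctCountAfterRemoval(nums: List[int], removalCount: int) -> int:
--     freqs = sorted(collections.Counter(nums).values())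
--     prefix = []
--     total = 0
--     for f in freqs:
--         total += f
--         prefix.append(total)
--     # bisect_right(prefix, removalCount) by hand: first index with prefix[i] > removalCount
--     lo, hi = 0, len(prefix)
--     while lo < hi:
--         mid = (lo + hi) // 2
--         if removalCount < prefix[mid]:
--             hi = mid
--         else:
--             lo = mid + 1
--     return len(freqs) - lo
-- ===== Notes on version B (the rewrite author's own statement) =====
-- stated objective: alternative
-- what changed: Replaces the greedy accumulator loop with early break by a prefix-sum table over the ascending frequencies plus a hand-written binary search (bisect_right) for the number of wholly removable frequency groups.
import Mathlib
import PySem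

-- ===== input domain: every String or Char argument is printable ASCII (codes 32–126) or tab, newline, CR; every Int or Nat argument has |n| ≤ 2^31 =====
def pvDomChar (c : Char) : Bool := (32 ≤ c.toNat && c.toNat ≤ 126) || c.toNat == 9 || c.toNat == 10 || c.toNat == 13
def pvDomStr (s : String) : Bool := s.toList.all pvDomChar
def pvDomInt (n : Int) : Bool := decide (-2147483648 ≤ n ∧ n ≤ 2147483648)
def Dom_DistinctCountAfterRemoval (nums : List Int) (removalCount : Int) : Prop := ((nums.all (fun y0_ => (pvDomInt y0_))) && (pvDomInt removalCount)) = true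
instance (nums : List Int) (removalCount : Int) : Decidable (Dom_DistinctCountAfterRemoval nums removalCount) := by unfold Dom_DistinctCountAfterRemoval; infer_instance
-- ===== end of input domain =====

-- B replaces A's greedy accumulator loop (with break) by a prefix-sum table over the
-- ascending frequencies plus a hand-written binary search; alternative decomposition, same cost.

-- ===== PORT A =====
-- the `for freq in freqs` loop with its mutable (result, removalCount) state and `break`
def pvLoopA : List Int → Int → Int → Int
  | [], result, _ => result
  | f :: rest, result, k => if k ≥ f then pvLoopA rest (result - 1) (k - f) else result

def DistinctCountAfterRemoval (nums : List Int) (removalCount : Int) : Int :=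
  let counter := PySem.Dict.counter nums
  let freqs := PySem.List.sorted counter.values (fun x => x)
  pvLoopA freqs (freqs.length : Int) removalCount

-- ===== PORT B =====
-- the prefix-building loop: running total, appending each new total
def pvPrefix : List Int → Int → List Int
  | [], _ => []
  | f :: rest, total => (total + f) :: pvPrefix rest (total + f)

-- the hand-written bisect_right `while lo < hi` loop (fuel = hi - lo bound, as in Python it terminates)
def pvBisect (a : List Int) (x : Int) : Nat → Nat → Nat → Nat
  | 0, lo, _ => lo
  | fuel + 1, lo, hi =>
    if lo < hi then
      match a[(lo + hi) / 2]? with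
      | some y => if x < y then pvBisect a x fuel lo ((lo + hi) / 2)
                  else pvBisect a x fuel ((lo + hi) / 2 + 1) hi
      | none => lo
    else lo

def DistinctCountAfterRemoval_alt (nums : List Int) (removalCount : Int) : Int :=
  let freqs := PySem.List.sorted (PySem.Dict.counter nums).values (fun x => x)
  let pref := pvPrefix freqs 0
  (freqs.length : Int) - (pvBisect pref removalCount pref.length 0 pref.length : Int)

-- ===== PRECONDITION & SPEC =====
def Spec_DistinctCountAfterRemoval (nums : List Int) (removalCount : Int) (out : Int) : Prop := out = DistinctCountAfterRemoval_alt nums removalCount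
instance (nums : List Int) (removalCount : Int) (out : Int) : Decidable (Spec_DistinctCountAfterRemoval nums removalCount out) := by unfold Spec_DistinctCountAfterRemoval; infer_instance

-- ===== CLAIM (what is proved, stated in full; the proofs are below) =====
def Claim_equal_DistinctCountAfterRemoval : Prop := ∀ (nums : List Int) (removalCount : Int), Dom_DistinctCountAfterRemoval nums removalCount → Spec_DistinctCountAfterRemoval nums removalCount (DistinctCountAfterRemoval nums removalCount)

-- ===== LEMMAS AND PROOFS =====

-- number of leading frequencies whose running removal budget suffices
def pvGreedy : List Int → Int → Nat
  | [], _ => 0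
  | f :: rest, k => if k ≥ f then pvGreedy rest (k - f) + 1 else 0

theorem pvLoopA_eq_sub (l : List Int) (r k : Int) :
    pvLoopA l r k = r - (pvGreedy l k : Int) := by
  induction l generalizing r k with
  | nil => simp [pvLoopA, pvGreedy]
  | cons f rest ih =>
    simp only [pvLoopA, pvGreedy]
    split_ifs with h
    · rw [ih]; push_cast; ring
    · simp

theorem pvGreedy_eq_takeWhile (l : List Int) (k t : Int) :
    pvGreedy l k = (List.takeWhile (fun p => p ≤ k + t) (pvPrefix l t)).length := by
  induction l generalizing k t with
  | nil => simp [pvGreedy, pvPrefix]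
  | cons f rest ih =>
    simp only [pvGreedy, pvPrefix, List.takeWhile]
    by_cases h : k ≥ f
    · have hc : (t + f) ≤ k + t := by omega
      simp only [if_pos h, decide_eq_true hc, List.length_cons]
      have := ih (k - f) (t + f)
      have harg : k - f + (t + f) = k + t := by ring
      rw [harg] at this
      omega
    · have hc : ¬ (t + f) ≤ k + t := by omega
      simp [if_neg h, hc]

theorem pvPrefix_lower (l : List Int) (t : Int) (hpos : ∀ f ∈ l, 0 ≤ f) :
    ∀ p ∈ pvPrefix l t, t ≤ p := by
  induction l generalizing t with
  | nil => simp [pvPrefix]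
  | cons f rest ih =>
    intro p hp
    simp only [pvPrefix, List.mem_cons] at hp
    have hf : 0 ≤ f := hpos f (by simp)
    rcases hp with rfl | hp
    · omega
    · have := ih (t + f) (fun g hg => hpos g (by simp [hg])) p hp
      omega

theorem pvPrefix_pairwise (l : List Int) (t : Int) (hpos : ∀ f ∈ l, 0 ≤ f) :
    (pvPrefix l t).Pairwise (fun a b => a ≤ b) := by
  induction l generalizing t with
  | nil => simp [pvPrefix]
  | cons f rest ih =>
    have hrest : ∀ g ∈ rest, 0 ≤ g := fun g hg => hpos g (by simp [hg])
    simp only [pvPrefix, List.pairwise_cons]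
    exact ⟨pvPrefix_lower rest (t + f) hrest, ih (t + f) hrest⟩

theorem pvBisect_eq_loop (a : List Int) (x : Int) (fuel lo hi : Nat) :
    pvBisect a x fuel lo hi = PySem.List.bisectRightLoop a x fuel lo hi := by
  induction fuel generalizing lo hi with
  | zero => simp [pvBisect, PySem.List.bisectRightLoop]
  | succ n ih =>
    simp only [pvBisect, PySem.List.bisectRightLoop]
    split_ifs with h
    · cases a[(lo + hi) / 2]? with
      | none => rfl
      | some y => by_cases hx : x < y <;> simp [hx, ih]
    · rfl

-- elementary characterisation of the length of takeWhile (≤ x)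
theorem takeWhile_len_spec (x : Int) (a : List Int) :
    (List.takeWhile (fun p => decide (p ≤ x)) a).length ≤ a.length ∧
    (∀ j (hj : j < a.length), j < (List.takeWhile (fun p => decide (p ≤ x)) a).length → a[j] ≤ x) ∧
    (∀ (h : (List.takeWhile (fun p => decide (p ≤ x)) a).length < a.length),
      ¬ a[(List.takeWhile (fun p => decide (p ≤ x)) a).length] ≤ x) := by
  induction a with
  | nil => simp
  | cons q rest ih =>
    obtain ⟨ih1, ih2, ih3⟩ := ih
    by_cases hq : q ≤ x
    · rw [List.takeWhile_cons, if_pos (by simpa using hq)]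
      simp only [List.length_cons]
      refine ⟨by omega, ?_, ?_⟩
      · intro j hj hjm
        cases j with
        | zero => simpa using hq
        | succ i => simpa using ih2 i (by simpa using hj) (by omega)
      · intro h
        simpa using ih3 (by simpa using h)
    · rw [List.takeWhile_cons, if_neg (by simpa using hq)]
      simp only [List.length_nil]
      exact ⟨by omega, by omega, fun _ => by simpa using hq⟩

-- on a nondecreasing list, bisect_right computes the length of the `≤ x` leading run
theorem bisectRight_eq_takeWhile (a : List Int) (x : Int)
    (hs : a.Pairwise (fun p q => p ≤ q)) :
    PySem.List.bisectRight a x = (List.takeWhile (fun p => p ≤ x) a).length := by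
  obtain ⟨hle, hbelow, habove⟩ := PySem.List.bisectRight_spec a x hs
  obtain ⟨hmle, htw, hbound⟩ := takeWhile_len_spec x a
  set n := PySem.List.bisectRight a x with hn
  set m := (List.takeWhile (fun p => decide (p ≤ x)) a).length with hm
  rcases lt_trichotomy n m with h | h | h
  · exfalso
    have hx := habove n (by omega) (le_refl _)
    have := htw n (by omega) h
    omega
  · exact h
  · exfalso
    exact hbound (by omega) (hbelow m (by omega) h)

theorem counter_values_pos (nums : List Int) :
    ∀ v ∈ (PySem.Dict.counter nums).values, 0 ≤ v := by
  intro v hv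
  rw [PySem.Dict.values_eq_map_keys _ (PySem.Dict.nodup_keys_counter nums) 0] at hv
  simp only [List.mem_map] at hv
  obtain ⟨k, hk, rfl⟩ := hv
  rw [PySem.Dict.getD_counter]
  positivity

-- ===== VERDICT (by name: the statement is the Claim_ definition above) =====
theorem DistinctCountAfterRemoval_spec : Claim_equal_DistinctCountAfterRemoval := by
  intro nums removalCount _
  unfold Spec_DistinctCountAfterRemoval DistinctCountAfterRemoval DistinctCountAfterRemoval_alt
  simp only []
  set freqs := PySem.List.sorted (PySem.Dict.counter nums).values (fun x => x) with hf
  have hpos : ∀ f ∈ freqs, 0 ≤ f := by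
    intro f hfm
    exact counter_values_pos nums f ((PySem.List.mem_sorted _ _ _ _).1 hfm)
  have hpair := pvPrefix_pairwise freqs 0 hpos
  have hb : pvBisect (pvPrefix freqs 0) removalCount (pvPrefix freqs 0).length 0 (pvPrefix freqs 0).length
      = PySem.List.bisectRight (pvPrefix freqs 0) removalCount := by
    rw [pvBisect_eq_loop]; rfl
  rw [pvLoopA_eq_sub, pvGreedy_eq_takeWhile freqs removalCount 0, hb,
    bisectRight_eq_takeWhile _ _ hpair]
  norm_num
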